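-- pv_equiv track=rewrite | github.com/docxology/codomyrmex | src/codomyrmex/data_visualization/mermaid/mermaid_generator.py | _build_workflow_from_data
-- ===== SOURCE A (Python) =====
-- from typing import Any
--
-- def _build_workflow_from_data(
--     workflow_steps: list[dict[str, Any]], title: str
-- ) -> list[str]:
--     """Build workflow flowchart from step data."""
--     lines = ["flowchart TD"]
--
--     prev_step = "Start([Start])"
--
--     for i, step in enumerate(workflow_steps):
--         step_name = step.get("name", f"Step{i}")
--         step_type = step.get("type", "process")
--         step_description = step.get("description", step_name)
--
--         # Format step based on type
--         if step_type == "decision":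
--             current_step = f"{step_name}{{{step_description}?}}"
--         elif step_type == "terminal":
--             current_step = f"{step_name}([{step_description}])"
--         else:
--             current_step = f"{step_name}[{step_description}]"
--
--         lines.append(f"    {prev_step} --> {current_step}")
--         prev_step = current_step
--
--     return lines
-- ===== SOURCE B (Python) =====
-- def _build_workflow_from_data(workflow_steps, title):
--     """Build workflow flowchart: each edge line computed independently by random access."""
--     def node(i):
--         step = workflow_steps[i]
--         name = step.get("name", f"Step{i}")
--         typ = step.get("type", "process")
--         desc = step.get("description", name)
--         if typ == "decision":
--             return f"{name}{{{desc}?}}"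
--         if typ == "terminal":
--             return f"{name}([{desc}])"
--         return f"{name}[{desc}]"
--
--     return ["flowchart TD"] + [
--         f"    {'Start([Start])' if i == 0 else node(i - 1)} --> {node(i)}"
--         for i in range(len(workflow_steps))
--     ]
-- ===== Notes on version B (the rewrite author's own statement) =====
-- stated objective: alternative
-- what changed: Replaces A's single stateful loop carrying a prev_step accumulator by a stateless random-access formulation: edge i is computed independently from indices i-1 and i alone (re-formatting its predecessor node on demand), so no state is threaded and no intermediate node list exists.
import Mathlib
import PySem

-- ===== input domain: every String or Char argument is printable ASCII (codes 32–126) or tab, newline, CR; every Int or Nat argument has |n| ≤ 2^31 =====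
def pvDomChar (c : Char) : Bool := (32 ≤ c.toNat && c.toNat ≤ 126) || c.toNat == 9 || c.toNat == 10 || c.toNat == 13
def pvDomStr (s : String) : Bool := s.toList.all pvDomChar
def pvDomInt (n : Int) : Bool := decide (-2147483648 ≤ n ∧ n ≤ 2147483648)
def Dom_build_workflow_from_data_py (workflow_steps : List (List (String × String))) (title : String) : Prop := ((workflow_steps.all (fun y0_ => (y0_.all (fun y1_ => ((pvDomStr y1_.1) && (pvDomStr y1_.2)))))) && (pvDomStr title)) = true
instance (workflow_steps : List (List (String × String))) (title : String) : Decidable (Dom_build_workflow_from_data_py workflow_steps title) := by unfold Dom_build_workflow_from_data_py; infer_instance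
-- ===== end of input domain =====

-- B replaces A's stateful prev_step loop by a stateless random-access pass: edge i is computed
-- independently from indices i-1 and i (re-formatting the predecessor node on demand); alternative
-- decomposition, same cost.

-- shared primitive: Python's dict.get(k, dflt) on an association list (first match)
def pyDictGet (d : List (String × String)) (k dflt : String) : String :=
  match d.find? (fun p => p.1 == k) with
  | some p => p.2
  | none => dflt

-- ===== PORT A =====
-- the for-loop of A, carrying (lines, prev_step) and the enumerate counter i
def buildLoopA : List (List (String × String)) → Int → List String → String → List String
  | [], _, lines, _ => lines
  | step :: rest, i, lines, prev_step =>
    let step_name := pyDictGet step "name" ("Step" ++ PySem.Int.toStr i)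
    let step_type := pyDictGet step "type" "process"
    let step_description := pyDictGet step "description" step_name
    let current_step :=
      if step_type = "decision" then step_name ++ "{" ++ step_description ++ "?}"
      else if step_type = "terminal" then step_name ++ "([" ++ step_description ++ "])"
      else step_name ++ "[" ++ step_description ++ "]"
    buildLoopA rest (i + 1) (lines ++ ["    " ++ prev_step ++ " --> " ++ current_step]) current_step

def build_workflow_from_data_py (workflow_steps : List (List (String × String))) (title : String) : List String :=
  buildLoopA workflow_steps 0 ["flowchart TD"] "Start([Start])"

-- ===== PORT B =====
-- Source B's node(i): workflow_steps[i] formatted; i is always in range(len) at every call site,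
-- so (pyGet? …).getD [] is exact there
def nodeB (ws : List (List (String × String))) (i : Int) : String :=
  let step := (PySem.List.pyGet? ws i).getD []
  let name := pyDictGet step "name" ("Step" ++ PySem.Int.toStr i)
  let typ := pyDictGet step "type" "process"
  let desc := pyDictGet step "description" name
  if typ = "decision" then name ++ "{" ++ desc ++ "?}"
  else if typ = "terminal" then name ++ "([" ++ desc ++ "])"
  else name ++ "[" ++ desc ++ "]"

def build_workflow_from_data_py_alt (workflow_steps : List (List (String × String))) (title : String) : List String :=
  "flowchart TD" ::
    (PySem.List.pyRange 0 workflow_steps.length 1).map (fun i =>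
      "    " ++ (if i = 0 then "Start([Start])" else nodeB workflow_steps (i - 1))
        ++ " --> " ++ nodeB workflow_steps i)

-- ===== PRECONDITION & SPEC =====
def Spec_build_workflow_from_data_py (workflow_steps : List (List (String × String))) (title : String) (out : List String) : Prop := out = build_workflow_from_data_py_alt workflow_steps title
instance (workflow_steps : List (List (String × String))) (title : String) (out : List String) : Decidable (Spec_build_workflow_from_data_py workflow_steps title out) := by unfold Spec_build_workflow_from_data_py; infer_instance

-- ===== CLAIM (what is proved, stated in full; the proofs are below) =====
def Claim_equal_build_workflow_from_data_py : Prop := ∀ (workflow_steps : List (List (String × String))) (title : String), Dom_build_workflow_from_data_py workflow_steps title → Spec_build_workflow_from_data_py workflow_steps title (build_workflow_from_data_py workflow_steps title)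

-- ===== LEMMAS AND PROOFS =====

-- the common node formatter, for stating the characterisations
def fmtStep (i : Int) (step : List (String × String)) : String :=
  let name := pyDictGet step "name" ("Step" ++ PySem.Int.toStr i)
  let typ := pyDictGet step "type" "process"
  let desc := pyDictGet step "description" name
  if typ = "decision" then name ++ "{" ++ desc ++ "?}"
  else if typ = "terminal" then name ++ "([" ++ desc ++ "])"
  else name ++ "[" ++ desc ++ "]"

-- the edge list A's loop produces, with the lines prefix stripped
def edgesA : List (List (String × String)) → Int → String → List String
  | [], _, _ => []
  | s :: r, i, prev => ("    " ++ prev ++ " --> " ++ fmtStep i s) :: edgesA r (i + 1) (fmtStep i s)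

theorem buildLoopA_eq_edgesA (ws : List (List (String × String))) :
    ∀ (i : Int) (lines : List String) (prev : String),
      buildLoopA ws i lines prev = lines ++ edgesA ws i prev := by
  induction ws with
  | nil => intro i lines prev; simp [buildLoopA, edgesA]
  | cons s r ih =>
    intro i lines prev
    simp only [buildLoopA, edgesA, fmtStep, ih]
    simp

theorem edgesA_length (ws : List (List (String × String))) :
    ∀ (i : Int) (prev : String), (edgesA ws i prev).length = ws.length := by
  induction ws with
  | nil => intro i prev; simp [edgesA]
  | cons s r ih => intro i prev; simp [edgesA, ih]

theorem edgesA_getElem? (ws : List (List (String × String))) :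
    ∀ (i : Int) (prev : String) (j : Nat), j < ws.length →
      (edgesA ws i prev)[j]? =
        some ("    " ++ (if j = 0 then prev else fmtStep (i + j - 1) (ws.getD (j - 1) []))
          ++ " --> " ++ fmtStep (i + j) (ws.getD j [])) := by
  induction ws with
  | nil => intro i prev j h; simp at h
  | cons s r ih =>
    intro i prev j h
    cases j with
    | zero => simp [edgesA]
    | succ k =>
      simp only [edgesA, List.getElem?_cons_succ]
      rw [ih (i + 1) (fmtStep i s) k (by simpa using h)]
      cases k with
      | zero => simp
      | succ m =>
        have e1 : i + 1 + ((m : Int) + 1) - 1 = i + ((m : Int) + 1 + 1) - 1 := by ring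
        have e2 : i + 1 + ((m : Int) + 1) = i + ((m : Int) + 1 + 1) := by ring
        simp
        rw [e1, e2]

theorem nodeB_eq_fmtStep (ws : List (List (String × String))) (i : Int) (h0 : 0 ≤ i) :
    nodeB ws i = fmtStep i ((ws[i.toNat]?).getD []) := by
  simp only [nodeB, fmtStep, PySem.List.pyGet?_of_nonneg _ h0]

theorem alt_eq_edgesA (ws : List (List (String × String))) (title : String) :
    build_workflow_from_data_py_alt ws title = "flowchart TD" :: edgesA ws 0 "Start([Start])" := by
  unfold build_workflow_from_data_py_alt
  congr 1
  apply List.ext_getElem?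
  intro j
  by_cases hj : j < ws.length
  · rw [edgesA_getElem? ws 0 "Start([Start])" j hj]
    have hlen : ((PySem.List.pyRange 0 (↑ws.length) 1).map (fun i =>
        "    " ++ (if i = 0 then "Start([Start])" else nodeB ws (i - 1))
          ++ " --> " ++ nodeB ws i)).length = ws.length := by
      simp [PySem.List.length_pyRange_one]
    rw [List.getElem?_eq_getElem (by rw [hlen]; exact hj)]
    simp only [List.getElem_map, PySem.List.getElem_pyRange_one, zero_add]
    cases j with
    | zero =>
      rw [Nat.cast_zero, nodeB_eq_fmtStep ws 0 le_rfl]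
      simp [List.getD_eq_getElem?_getD]
    | succ k =>
      have hne : ((k : Int) + 1) ≠ 0 := by omega
      have ht1 : ((k : Int) + 1).toNat = k + 1 := by omega
      have hc : ((k : Int) + 1 - 1) = (k : Int) := by ring
      push_cast
      rw [if_neg hne, nodeB_eq_fmtStep ws ((k : Int) + 1) (by omega), hc,
        nodeB_eq_fmtStep ws (k : Int) (by omega), ht1]
      simp [List.getD_eq_getElem?_getD]
  · rw [List.getElem?_eq_none, List.getElem?_eq_none]
    · rw [edgesA_length]; omega
    · simp [PySem.List.length_pyRange_one]; omega

-- ===== VERDICT (by name: the statement is the Claim_ definition above) =====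
theorem build_workflow_from_data_py_spec : Claim_equal_build_workflow_from_data_py := by
  intro ws title _
  unfold Spec_build_workflow_from_data_py build_workflow_from_data_py
  rw [buildLoopA_eq_edgesA, alt_eq_edgesA]
  simp
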